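-- pv_equiv track=rewrite | github.com/lcapuano-app/madru-bot | src/utils/math/int_decimal_size.py | get_int_decimal_size
-- ===== SOURCE A (Python) =====
-- def get_int_decimal_size( val: int ) -> int:
--
--     try:
--         # We will add zeros to form tens, hundreds, etc...
--         acc: list[str] = ['1']
--
--         # Int str representation
--         val_str: str = str( val )
--
--         # Adds zeros to acc
--         for _ in val_str:
--             acc.append('0')
--
--         acc.pop()
--
--         # Joins acc to string, then casts to an int
--         size = int( ''.join( acc) )
--
--         return size
--
--     except Exception:
--         return 1
-- ===== SOURCE B (Python) =====
-- def get_int_decimal_size(val: int) -> int: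
--     try:
--         return 10 ** (len(str(val)) - 1)
--     except Exception:
--         return 1
-- ===== Notes on version B (the rewrite author's own statement) =====
-- stated objective: simpler
-- what changed: B replaces A's build-a-list-of-zero-characters, pop, join and re-parse-with-int() pipeline by directly exponentiating: ten to the power of one less than the length of str(val).
import Mathlib
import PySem

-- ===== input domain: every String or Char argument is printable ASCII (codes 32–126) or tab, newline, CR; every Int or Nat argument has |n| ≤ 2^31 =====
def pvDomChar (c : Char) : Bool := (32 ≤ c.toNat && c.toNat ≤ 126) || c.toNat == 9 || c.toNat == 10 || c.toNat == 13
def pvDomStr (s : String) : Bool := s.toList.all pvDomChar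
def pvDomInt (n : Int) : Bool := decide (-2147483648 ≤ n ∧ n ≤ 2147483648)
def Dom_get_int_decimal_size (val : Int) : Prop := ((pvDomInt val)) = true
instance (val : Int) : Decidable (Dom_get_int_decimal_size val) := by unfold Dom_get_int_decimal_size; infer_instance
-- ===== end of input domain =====

-- B replaces A's build-zeros-list / join / int() re-parse pipeline by the closed form 10 ** (len(str(val)) - 1); objective: simpler.
-- ===== PORT A =====
def get_int_decimal_size (val : Int) : Int :=
  -- acc: list[str] = ['1']
  let acc : List Char := ['1']
  -- val_str = str(val)
  let val_str : List Char := PySem.Int.toChars val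
  -- for _ in val_str: acc.append('0')
  let acc := val_str.foldl (fun a _ => a ++ ['0']) acc
  -- acc.pop()  (removes the last element)
  let acc := acc.dropLast
  -- size = int(''.join(acc)); return size — except Exception: return 1
  match PySem.Int.ofChars? acc with
  | some size => size
  | none => 1

-- ===== PORT B =====
def get_int_decimal_size_alt (val : Int) : Int :=
  -- 10 ** (len(str(val)) - 1); str(val) is never empty, so the exponent is a Nat
  10 ^ ((PySem.Int.toChars val).length - 1)

-- ===== PRECONDITION & SPEC =====
def Spec_get_int_decimal_size (val : Int) (out : Int) : Prop := out = get_int_decimal_size_alt val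
instance (val : Int) (out : Int) : Decidable (Spec_get_int_decimal_size val out) := by unfold Spec_get_int_decimal_size; infer_instance

-- ===== CLAIM (what is proved, stated in full; the proofs are below) =====
def Claim_equal_get_int_decimal_size : Prop := ∀ (val : Int), Dom_get_int_decimal_size val → Spec_get_int_decimal_size val (get_int_decimal_size val)

-- ===== LEMMAS AND PROOFS =====

-- str(n) of a nonnegative Nat has at least one character
lemma toDigits_length_pos (b n : Nat) : 0 < (Nat.toDigits b n).length := by
  unfold Nat.toDigits
  simp only [Nat.toDigitsCore]
  split
  · simp
  · rw [Nat.toDigitsCore_lens_eq]; omega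

-- length bounds of str(val) on the domain |val| ≤ 2^31
lemma toChars_length_bounds (val : Int) (h : Dom_get_int_decimal_size val) :
    1 ≤ (PySem.Int.toChars val).length ∧ (PySem.Int.toChars val).length ≤ 11 := by
  have hd : -2147483648 ≤ val ∧ val ≤ 2147483648 := by
    simpa [Dom_get_int_decimal_size, pvDomInt] using h
  unfold PySem.Int.toChars
  split
  · have hp := toDigits_length_pos 10 val.natAbs
    have hle : (Nat.toDigits 10 val.natAbs).length ≤ 10 :=
      Nat.toDigits_length 10 val.natAbs 10 (by norm_num) (by
        have : val.natAbs ≤ 2147483648 := by omega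
        omega)
    simp only [List.length_cons]; omega
  · have hp := toDigits_length_pos 10 val.toNat
    have hle : (Nat.toDigits 10 val.toNat).length ≤ 10 :=
      Nat.toDigits_length 10 val.toNat 10 (by norm_num) (by
        have : val.toNat ≤ 2147483648 := by omega
        omega)
    omega

-- int('1' + '0'*(L-1)) = 10^(L-1) for every digit-string length the domain allows
lemma parse_one_zeros (L : Nat) (h1 : 1 ≤ L) (h2 : L ≤ 11) :
    (match PySem.Int.ofChars? (('1' :: List.replicate L '0').dropLast) with
     | some n => n
     | none => (1 : Int)) = 10 ^ (L - 1) := by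
  interval_cases L <;> decide

-- ===== VERDICT (by name: the statement is the Claim_ definition above) =====
theorem get_int_decimal_size_spec : Claim_equal_get_int_decimal_size := by
  intro val hdom
  obtain ⟨h1, h2⟩ := toChars_length_bounds val hdom
  unfold Spec_get_int_decimal_size get_int_decimal_size get_int_decimal_size_alt
  simp only [PySem.List.foldl_append_singleton_eq_map, List.map_const', List.singleton_append]
  generalize hL : (PySem.Int.toChars val).length = L at h1 h2 ⊢
  exact parse_one_zeros L h1 h2
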